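-- pv_equiv track=rewrite | github.com/Hugo-Liang93/MT5Services | src/studio/service.py | _overall_health
-- ===== SOURCE A (Python) =====
-- from typing import Any, Callable
--
-- def _overall_health(agents: list[dict[str, Any]]) -> str:
--     """Derive overall health string from agent alert levels."""
--     has_error = any(a.get("alertLevel") == "error" for a in agents)
--     has_warning = any(a.get("alertLevel") == "warning" for a in agents)
--     if has_error:
--         return "unhealthy"
--     if has_warning:
--         return "degraded"
--     return "healthy"
-- ===== SOURCE B (Python) =====
-- def _overall_health(agents: list) -> str:
--     """Derive overall health string from agent alert levels."""
--     has_warning = False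
--     for a in agents:
--         lvl = a.get("alertLevel")
--         if lvl == "error":
--             return "unhealthy"
--         if lvl == "warning":
--             has_warning = True
--     return "degraded" if has_warning else "healthy"
-- ===== Notes on version B (the rewrite author's own statement) =====
-- stated objective: simpler
-- what changed: Replaced the two separate any() scans over agents with a single loop that reads alertLevel once per agent, returning 'unhealthy' immediately on an error and tracking warnings in a flag.
import Mathlib
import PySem

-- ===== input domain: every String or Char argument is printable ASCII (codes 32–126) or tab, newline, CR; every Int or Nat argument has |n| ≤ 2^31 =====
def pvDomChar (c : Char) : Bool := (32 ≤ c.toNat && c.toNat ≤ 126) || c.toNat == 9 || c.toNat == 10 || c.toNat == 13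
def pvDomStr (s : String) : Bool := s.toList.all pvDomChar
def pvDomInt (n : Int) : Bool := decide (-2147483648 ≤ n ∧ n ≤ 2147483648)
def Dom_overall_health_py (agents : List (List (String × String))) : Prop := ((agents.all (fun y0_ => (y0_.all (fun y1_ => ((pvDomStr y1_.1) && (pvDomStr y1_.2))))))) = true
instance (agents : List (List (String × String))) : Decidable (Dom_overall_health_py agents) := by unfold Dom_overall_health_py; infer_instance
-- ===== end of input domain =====

-- B replaces the two any() scans with a single loop (early return on "error", warning flag): simpler, same cost.
-- ===== PORT A =====
def overall_health_py (agents : List (List (String × String))) : String :=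
  let has_error := agents.any (fun a => PySem.Dict.get? (PySem.Dict.mk a) "alertLevel" == some "error")
  let has_warning := agents.any (fun a => PySem.Dict.get? (PySem.Dict.mk a) "alertLevel" == some "warning")
  if has_error then "unhealthy"
  else if has_warning then "degraded"
  else "healthy"

-- ===== PORT B =====
def overall_health_py_alt_loop (agents : List (List (String × String))) (has_warning : Bool) : String :=
  match agents with
  | [] => if has_warning then "degraded" else "healthy"
  | a :: rest =>
    let lvl := PySem.Dict.get? (PySem.Dict.mk a) "alertLevel"
    if lvl == some "error" then "unhealthy"
    else if lvl == some "warning" then overall_health_py_alt_loop rest true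
    else overall_health_py_alt_loop rest has_warning

def overall_health_py_alt (agents : List (List (String × String))) : String :=
  overall_health_py_alt_loop agents false

-- ===== PRECONDITION & SPEC =====
def Spec_overall_health_py (agents : List (List (String × String))) (out : String) : Prop := out = overall_health_py_alt agents
instance (agents : List (List (String × String))) (out : String) : Decidable (Spec_overall_health_py agents out) := by unfold Spec_overall_health_py; infer_instance

-- ===== CLAIM (what is proved, stated in full; the proofs are below) =====
def Claim_equal_overall_health_py : Prop := ∀ (agents : List (List (String × String))), Dom_overall_health_py agents → Spec_overall_health_py agents (overall_health_py agents)

-- ===== LEMMAS AND PROOFS =====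

-- ===== VERDICT (by name: the statement is the Claim_ definition above) =====
theorem alt_loop_eq (agents : List (List (String × String))) (w : Bool) :
    overall_health_py_alt_loop agents w =
      (if agents.any (fun a => PySem.Dict.get? (PySem.Dict.mk a) "alertLevel" == some "error") then "unhealthy"
       else if w || agents.any (fun a => PySem.Dict.get? (PySem.Dict.mk a) "alertLevel" == some "warning") then "degraded"
       else "healthy") := by
  induction agents generalizing w with
  | nil => simp [overall_health_py_alt_loop]
  | cons a rest ih =>
    simp only [overall_health_py_alt_loop, List.any_cons]
    by_cases he : (PySem.Dict.get? (PySem.Dict.mk a) "alertLevel" == some "error") = true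
    · simp [he]
    · by_cases hw : (PySem.Dict.get? (PySem.Dict.mk a) "alertLevel" == some "warning") = true
      · simp [he, hw, ih]
      · simp [he, hw, ih]

theorem overall_health_py_spec : Claim_equal_overall_health_py := by
  intro agents _
  unfold Spec_overall_health_py overall_health_py overall_health_py_alt
  rw [alt_loop_eq]
  simp
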